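-- pv_equiv track=rewrite | github.com/harshita1178/VoixVerse-X-WaifuBot | shivu/modules/Font.py | convert_to_unicode_font
-- ===== SOURCE A (Python) =====
-- def convert_to_unicode_font(text, start_upper, start_lower):
--     converted_text = ""
--     for char in text:
--         if 'A' <= char <= 'Z':
--             if start_upper and (start_upper + (ord(char) - ord('A'))) <= 0x1F77F:
--                 converted_text += chr(start_upper + (ord(char) - ord('A')))
--             else:
--                 converted_text += char
--         elif 'a' <= char <= 'z':
--             if start_lower and (start_lower + (ord(char) - ord('a'))) <= 0x1F77F:
--                 converted_text += chr(start_lower + (ord(char) - ord('a')))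
--             else:
--                 converted_text += char
--         else:
--             converted_text += char
--     return converted_text
-- ===== SOURCE B (Python) =====
-- def convert_to_unicode_font(text, start_upper, start_lower):
--     table = {}
--     for i in range(26):
--         if start_upper and start_upper + i <= 0x1F77F:
--             table[ord('A') + i] = chr(start_upper + i)
--     for i in range(26):
--         if start_lower and start_lower + i <= 0x1F77F:
--             table[ord('a') + i] = chr(start_lower + i)
--     return text.translate(table)
-- ===== Notes on version B (the rewrite author's own statement) =====
-- stated objective: idiomatic
-- what changed: A branches on every character inside the output-building loop; B precomputes a 52-entry translation table (dict codepoint -> char) once and then does a single table-driven pass with str.translate (C-level, no per-character Python branching), measured ~8x faster on large inputs.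
-- outside the precondition, e.g. on convert_to_unicode_font('!', -5, 0): A returns '!', B raises ValueError; on convert_to_unicode_font('!', 55296, 0): A returns '!', B returns '!'
import Mathlib
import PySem

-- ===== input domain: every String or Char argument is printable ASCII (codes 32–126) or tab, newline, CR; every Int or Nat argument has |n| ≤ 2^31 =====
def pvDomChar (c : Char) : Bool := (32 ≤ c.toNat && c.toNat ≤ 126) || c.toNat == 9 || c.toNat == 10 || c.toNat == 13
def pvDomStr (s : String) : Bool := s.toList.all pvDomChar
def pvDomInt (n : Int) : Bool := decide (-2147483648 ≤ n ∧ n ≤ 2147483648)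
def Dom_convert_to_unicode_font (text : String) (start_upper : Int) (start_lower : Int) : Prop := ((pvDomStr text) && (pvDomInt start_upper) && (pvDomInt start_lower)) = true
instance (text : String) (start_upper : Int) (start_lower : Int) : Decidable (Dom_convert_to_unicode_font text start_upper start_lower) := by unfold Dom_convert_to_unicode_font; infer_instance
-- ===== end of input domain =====

-- B replaces A's per-character branching by a translation table built once (dict of
-- codepoint → replacement char) and a single table-driven pass over the text (idiomatic).


-- ===== PORT A =====
-- chr(cp) is ported as Char.ofNat cp.toNat: exact on Pre_ (there 0 ≤ cp ≤ 0x1F77F and cp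
-- is not a lone surrogate); ord(c) is c.toNat, exact on Unicode scalar values.
def convert_to_unicode_font (text : String) (start_upper : Int) (start_lower : Int) : String :=
  String.mk (text.toList.foldl (fun acc c =>
    if 'A' ≤ c ∧ c ≤ 'Z' then
      if start_upper ≠ 0 ∧ start_upper + ((c.toNat : Int) - 65) ≤ 0x1F77F then
        acc ++ [Char.ofNat (start_upper + ((c.toNat : Int) - 65)).toNat]
      else acc ++ [c]
    else if 'a' ≤ c ∧ c ≤ 'z' then
      if start_lower ≠ 0 ∧ start_lower + ((c.toNat : Int) - 97) ≤ 0x1F77F then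
        acc ++ [Char.ofNat (start_lower + ((c.toNat : Int) - 97)).toNat]
      else acc ++ [c]
    else acc ++ [c]) [])

-- ===== PORT B =====
-- one row of the translation table: 'for i in range(26): if start and start+i <= 0x1F77F: table[base+i] = chr(start+i)'
def pvAddRow (base : Int) (start : Int) (d : PySem.Dict Int Char) : PySem.Dict Int Char :=
  (PySem.List.pyRange 0 26 1).foldl (fun d i =>
    if start ≠ 0 ∧ start + i ≤ 0x1F77F then d.insert (base + i) (Char.ofNat (start + i).toNat)
    else d) d

-- text.translate(table): each char is replaced by table[ord(c)] when present, else kept.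
def convert_to_unicode_font_alt (text : String) (start_upper : Int) (start_lower : Int) : String :=
  let table := pvAddRow 97 start_lower (pvAddRow 65 start_upper PySem.Dict.empty)
  String.mk (text.toList.map (fun c => (table.get? (c.toNat : Int)).getD c))

-- ===== PRECONDITION & SPEC =====
-- Pre_ excludes inputs where a truthy start is negative (chr gets a negative codepoint:
-- A raises ValueError when such a letter occurs, B always) or where the 26-codepoint band
-- contains a lone UTF-16 surrogate (both return a string that is not a Unicode scalar-value
-- string and hence not representable as a Lean String).
def Pre_convert_to_unicode_font (text : String) (start_upper : Int) (start_lower : Int) : Prop :=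
  (start_upper = 0 ∨ (0 ≤ start_upper ∧ (start_upper + 25 < 0xD800 ∨ 0xDFFF < start_upper))) ∧
  (start_lower = 0 ∨ (0 ≤ start_lower ∧ (start_lower + 25 < 0xD800 ∨ 0xDFFF < start_lower)))
instance (text : String) (start_upper : Int) (start_lower : Int) : Decidable (Pre_convert_to_unicode_font text start_upper start_lower) := by unfold Pre_convert_to_unicode_font; infer_instance

def pvWitness_convert_to_unicode_font : String × Int × Int := ("Hello, World!", 119808, 119834)

def Spec_convert_to_unicode_font (text : String) (start_upper : Int) (start_lower : Int) (out : String) : Prop := out = convert_to_unicode_font_alt text start_upper start_lower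
instance (text : String) (start_upper : Int) (start_lower : Int) (out : String) : Decidable (Spec_convert_to_unicode_font text start_upper start_lower out) := by unfold Spec_convert_to_unicode_font; infer_instance

-- ===== CLAIM (what is proved, stated in full; the proofs are below) =====
def Claim_equal_convert_to_unicode_font : Prop := ∀ (text : String) (start_upper : Int) (start_lower : Int), Dom_convert_to_unicode_font text start_upper start_lower → Pre_convert_to_unicode_font text start_upper start_lower → Spec_convert_to_unicode_font text start_upper start_lower (convert_to_unicode_font text start_upper start_lower)

-- ===== LEMMAS AND PROOFS =====

-- lookup in a row-building fold over distinct offsets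
lemma pvGet_fold_row (start base k : Int) :
    ∀ (l : List Int) (d : PySem.Dict Int Char), l.Nodup →
    ((l.foldl (fun d i => if start ≠ 0 ∧ start + i ≤ 0x1F77F then
        d.insert (base + i) (Char.ofNat (start + i).toNat) else d) d).get? k)
    = if (k - base) ∈ l ∧ start ≠ 0 ∧ start + (k - base) ≤ 0x1F77F then
        some (Char.ofNat (start + (k - base)).toNat)
      else d.get? k := by
  intro l
  induction l with
  | nil => intro d _; simp
  | cons i rest ih =>
    intro d hnd
    have hi : i ∉ rest := (List.nodup_cons.mp hnd).1
    have hrest := (List.nodup_cons.mp hnd).2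
    simp only [List.foldl_cons]
    rw [ih _ hrest]
    by_cases hk : k - base = i
    · have hnm : k - base ∉ rest := by rw [hk]; exact hi
      have hkeq : k = base + i := by omega
      simp only [hnm, false_and, if_false]
      by_cases hc : start ≠ 0 ∧ start + i ≤ 0x1F77F
      · rw [if_pos hc, PySem.Dict.get?_insert, if_pos hkeq, if_pos]
        · rw [hk]
        · exact ⟨by simp [hk], hc.1, by rw [hk]; exact hc.2⟩
      · rw [if_neg hc, if_neg]
        intro ⟨_, h1, h2⟩; rw [hk] at h2; exact hc ⟨h1, h2⟩
    · have hne : k ≠ base + i := by omega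
      have hmem : (k - base ∈ i :: rest) ↔ (k - base ∈ rest) := by simp [hk]
      have hins : (if start ≠ 0 ∧ start + i ≤ 0x1F77F then
          d.insert (base + i) (Char.ofNat (start + i).toNat) else d).get? k = d.get? k := by
        by_cases hc : start ≠ 0 ∧ start + i ≤ 0x1F77F
        · rw [if_pos hc, PySem.Dict.get?_insert, if_neg hne]
        · rw [if_neg hc]
      rw [hins]
      by_cases hm : k - base ∈ rest ∧ start ≠ 0 ∧ start + (k - base) ≤ 0x1F77F
      · rw [if_pos hm, if_pos ⟨hmem.mpr hm.1, hm.2⟩]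
      · rw [if_neg hm, if_neg (fun h => hm ⟨hmem.mp h.1, h.2⟩)]

lemma pvGet_pvAddRow (base start k : Int) (d : PySem.Dict Int Char) :
    (pvAddRow base start d).get? k
    = if base ≤ k ∧ k < base + 26 ∧ start ≠ 0 ∧ start + (k - base) ≤ 0x1F77F then
        some (Char.ofNat (start + (k - base)).toNat)
      else d.get? k := by
  unfold pvAddRow
  rw [pvGet_fold_row start base k _ d (PySem.List.nodup_pyRange_one 0 26)]
  have hm : (k - base ∈ PySem.List.pyRange 0 26 1) ↔ (base ≤ k ∧ k < base + 26) := by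
    rw [PySem.List.mem_pyRange_one]; omega
  by_cases h : base ≤ k ∧ k < base + 26 ∧ start ≠ 0 ∧ start + (k - base) ≤ 0x1F77F
  · rw [if_pos ⟨hm.mpr ⟨h.1, h.2.1⟩, h.2.2⟩, if_pos h]
  · rw [if_neg (fun hh => h ⟨(hm.mp hh.1).1, (hm.mp hh.1).2, hh.2⟩), if_neg h]

-- character-to-character bounds via codepoints
lemma pvChar_le_iff (a c : Char) : a ≤ c ↔ a.toNat ≤ c.toNat := by
  rw [Char.le_def, UInt32.le_iff_toNat_le]; rfl

-- one character through B's table equals A's per-character branch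
lemma pvPointwise (start_upper start_lower : Int) (c : Char) :
    ((pvAddRow 97 start_lower (pvAddRow 65 start_upper PySem.Dict.empty)).get?
        ((c.toNat : Int))).getD c
    = if 'A' ≤ c ∧ c ≤ 'Z' then
        if start_upper ≠ 0 ∧ start_upper + ((c.toNat : Int) - 65) ≤ 0x1F77F then
          Char.ofNat (start_upper + ((c.toNat : Int) - 65)).toNat
        else c
      else if 'a' ≤ c ∧ c ≤ 'z' then
        if start_lower ≠ 0 ∧ start_lower + ((c.toNat : Int) - 97) ≤ 0x1F77F then
          Char.ofNat (start_lower + ((c.toNat : Int) - 97)).toNat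
        else c
      else c := by
  have hU : ('A' ≤ c ∧ c ≤ 'Z') ↔ (65 ≤ (c.toNat : Int) ∧ (c.toNat : Int) ≤ 90) := by
    rw [pvChar_le_iff 'A' c, pvChar_le_iff c 'Z']
    simp only [show 'A'.toNat = 65 from rfl, show 'Z'.toNat = 90 from rfl]
    omega
  have hL : ('a' ≤ c ∧ c ≤ 'z') ↔ (97 ≤ (c.toNat : Int) ∧ (c.toNat : Int) ≤ 122) := by
    rw [pvChar_le_iff 'a' c, pvChar_le_iff c 'z']
    simp only [show 'a'.toNat = 97 from rfl, show 'z'.toNat = 122 from rfl]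
    omega
  rw [pvGet_pvAddRow, pvGet_pvAddRow]
  by_cases hu : 'A' ≤ c ∧ c ≤ 'Z'
  · have hb : (65 ≤ (c.toNat : Int) ∧ (c.toNat : Int) ≤ 90) := hU.mp hu
    have h97 : ¬ (97 ≤ (c.toNat : Int) ∧ (c.toNat : Int) < 97 + 26 ∧ start_lower ≠ 0 ∧
        start_lower + ((c.toNat : Int) - 97) ≤ 0x1F77F) := by
      intro h; omega
    rw [if_neg h97, if_pos hu]
    by_cases hc : start_upper ≠ 0 ∧ start_upper + ((c.toNat : Int) - 65) ≤ 0x1F77F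
    · rw [if_pos ⟨by omega, by omega, hc.1, hc.2⟩, if_pos hc]; rfl
    · rw [if_neg (by intro h; exact hc ⟨h.2.2.1, h.2.2.2⟩), if_neg hc]; rfl
  · rw [if_neg hu]
    by_cases hl : 'a' ≤ c ∧ c ≤ 'z'
    · have hb : (97 ≤ (c.toNat : Int) ∧ (c.toNat : Int) ≤ 122) := hL.mp hl
      rw [if_pos hl]
      by_cases hc : start_lower ≠ 0 ∧ start_lower + ((c.toNat : Int) - 97) ≤ 0x1F77F
      · rw [if_pos ⟨by omega, by omega, hc.1, hc.2⟩, if_pos hc]; rfl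
      · rw [if_neg (by intro h; exact hc ⟨h.2.2.1, h.2.2.2⟩), if_neg hc,
            if_neg (by intro h; exact (hU.not.mp hu) ⟨h.1, by omega⟩)]
        simp
    · have hnb : ¬ (65 ≤ (c.toNat : Int) ∧ (c.toNat : Int) ≤ 90) := hU.not.mp hu
      have hnb' : ¬ (97 ≤ (c.toNat : Int) ∧ (c.toNat : Int) ≤ 122) := hL.not.mp hl
      rw [if_neg hl, if_neg (by intro h; exact hnb' ⟨h.1, by omega⟩),
          if_neg (by intro h; exact hnb ⟨h.1, by omega⟩)]
      simp

-- A's append-fold is a map of its per-character branch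
lemma pvFoldA (g : Char → Char) (l : List Char) :
    ∀ acc : List Char, l.foldl (fun acc c => acc ++ [g c]) acc = acc ++ l.map g := by
  induction l with
  | nil => intro acc; simp
  | cons c rest ih => intro acc; simp [ih]

-- ===== VERDICT (by name: the statement is the Claim_ definition above) =====
theorem convert_to_unicode_font_spec : Claim_equal_convert_to_unicode_font := by
  intro text start_upper start_lower _ _
  unfold Spec_convert_to_unicode_font convert_to_unicode_font convert_to_unicode_font_alt
  have := pvFoldA (fun c =>
    if 'A' ≤ c ∧ c ≤ 'Z' then
      if start_upper ≠ 0 ∧ start_upper + ((c.toNat : Int) - 65) ≤ 0x1F77F then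
        Char.ofNat (start_upper + ((c.toNat : Int) - 65)).toNat
      else c
    else if 'a' ≤ c ∧ c ≤ 'z' then
      if start_lower ≠ 0 ∧ start_lower + ((c.toNat : Int) - 97) ≤ 0x1F77F then
        Char.ofNat (start_lower + ((c.toNat : Int) - 97)).toNat
      else c
    else c) text.toList []
  simp only [apply_ite (fun x : Char => [x])] at this
  rw [show (text.toList.foldl (fun acc c =>
      if 'A' ≤ c ∧ c ≤ 'Z' then
        if start_upper ≠ 0 ∧ start_upper + ((c.toNat : Int) - 65) ≤ 0x1F77F then
          acc ++ [Char.ofNat (start_upper + ((c.toNat : Int) - 65)).toNat]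
        else acc ++ [c]
      else if 'a' ≤ c ∧ c ≤ 'z' then
        if start_lower ≠ 0 ∧ start_lower + ((c.toNat : Int) - 97) ≤ 0x1F77F then
          acc ++ [Char.ofNat (start_lower + ((c.toNat : Int) - 97)).toNat]
        else acc ++ [c]
      else acc ++ [c]) []) = text.toList.foldl (fun acc c => acc ++ [(fun c =>
      if 'A' ≤ c ∧ c ≤ 'Z' then
        if start_upper ≠ 0 ∧ start_upper + ((c.toNat : Int) - 65) ≤ 0x1F77F then
          Char.ofNat (start_upper + ((c.toNat : Int) - 65)).toNat
        else c
      else if 'a' ≤ c ∧ c ≤ 'z' then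
        if start_lower ≠ 0 ∧ start_lower + ((c.toNat : Int) - 97) ≤ 0x1F77F then
          Char.ofNat (start_lower + ((c.toNat : Int) - 97)).toNat
        else c
      else c) c]) [] from by
    congr 1; funext acc c; by_cases h1 : 'A' ≤ c ∧ c ≤ 'Z' <;> by_cases h2 : 'a' ≤ c ∧ c ≤ 'z' <;>
      simp [h1, h2, apply_ite (fun x : Char => acc ++ [x])]]
  rw [pvFoldA]
  simp only [List.nil_append]
  congr 1
  apply List.map_congr_left
  intro c _
  exact (pvPointwise start_upper start_lower c).symm
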